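-- pv_equiv track=rewrite | github.com/Iliaromanov/Python-mini-projects | algorithms/recursion.py | count8
-- ===== SOURCE A (Python) =====
-- def  count8(n: int) -> int:
--     """
--     Given a non-negative int n, compute recursively (no loops) the count of the occurrences of 8 as a digit, except that an 8 with another 8 immediately to its left counts double, so 8818 yields 4. Note that mod (%) by 10 yields the rightmost digit (126 % 10 is 6), while divide (/) by 10 removes the rightmost digit (126 / 10 is 12).
--     count8(8) → 1
--     count8(818) → 2
--     count8(8818) → 4
--     """
--
--     if n < 10:
--         if n == 8:
--             return 1
--         else:
--             return 0
--
--     left = n // 10 % 10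
--
--     num = n % 10
--
--     if num == 8 and left == 8:
--         return 2 + count8(n // 10)
--     elif num == 8:
--         return 1 + count8(n // 10)
--     else:
--         return count8(n // 10)
-- ===== SOURCE B (Python) =====
-- def count8(n: int) -> int:
--     # Count '8' digits, plus one extra for every adjacent '88' pair.
--     if n < 0:
--         return 0
--     s = str(n)
--     singles = sum(1 for ch in s if ch == '8')
--     doubles = sum(1 for a, b in zip(s, s[1:]) if a == '8' and b == '8')
--     return singles + doubles
-- ===== Notes on version B (the rewrite author's own statement) =====
-- stated objective: idiomatic
-- what changed: Replaced the right-to-left arithmetic digit recursion (repeated floor-division and remainder) by a flat pass over the decimal string: count of '8' characters plus count of adjacent '88' pairs (via zip of the string with its tail).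
import Mathlib
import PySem

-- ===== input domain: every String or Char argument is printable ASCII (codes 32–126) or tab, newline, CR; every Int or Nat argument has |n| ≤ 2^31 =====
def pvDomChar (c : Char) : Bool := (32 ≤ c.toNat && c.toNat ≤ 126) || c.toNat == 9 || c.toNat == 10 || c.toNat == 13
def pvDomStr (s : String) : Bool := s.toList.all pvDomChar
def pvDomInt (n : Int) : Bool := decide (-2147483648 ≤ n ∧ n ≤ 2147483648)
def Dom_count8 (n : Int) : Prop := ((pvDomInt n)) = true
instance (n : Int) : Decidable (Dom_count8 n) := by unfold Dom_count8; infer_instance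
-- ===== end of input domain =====

-- B replaces the arithmetic digit recursion by a flat pass over str(n): count of '8'
-- characters plus count of adjacent '88' pairs (idiomatic; same cost).

-- ===== PORT A =====
def count8 (n : Int) : Int :=
  if n < 10 then
    if n = 8 then 1 else 0
  else
    let left := PySem.Int.mod (PySem.Int.floordiv n 10) 10
    let num := PySem.Int.mod n 10
    if num = 8 ∧ left = 8 then 2 + count8 (PySem.Int.floordiv n 10)
    else if num = 8 then 1 + count8 (PySem.Int.floordiv n 10)
    else count8 (PySem.Int.floordiv n 10)
termination_by n.toNat
decreasing_by
  all_goals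
    rw [PySem.Int.floordiv_eq_ediv_of_pos (by omega)]
    omega

-- ===== PORT B =====
def count8_alt (n : Int) : Int :=
  if n < 0 then 0
  else
    let s := (PySem.Int.toStr n).toList
    let singles : Int := (s.map (fun ch => if ch = '8' then (1 : Int) else 0)).sum
    let doubles : Int :=
      ((s.zip (PySem.List.slice s (some 1))).map
        (fun p => if p.1 = '8' ∧ p.2 = '8' then (1 : Int) else 0)).sum
    singles + doubles

-- ===== PRECONDITION & SPEC =====
def Spec_count8 (n : Int) (out : Int) : Prop := out = count8_alt n
instance (n : Int) (out : Int) : Decidable (Spec_count8 n out) := by unfold Spec_count8; infer_instance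

-- ===== CLAIM (what is proved, stated in full; the proofs are below) =====
def Claim_equal_count8 : Prop := ∀ (n : Int), Dom_count8 n → Spec_count8 n (count8 n)

-- ===== LEMMAS AND PROOFS =====

/-- Decimal digit characters of `m`, most significant first (closed recursion, no fuel). -/
def rep (m : Nat) : List Char :=
  if _h : m < 10 then [Nat.digitChar m]
  else rep (m / 10) ++ [Nat.digitChar (m % 10)]
termination_by m
decreasing_by omega

lemma rep_getLast? (m : Nat) : (rep m).getLast? = some (Nat.digitChar (m % 10)) := by
  rw [rep]
  split
  · rename_i h
    simp [Nat.mod_eq_of_lt h]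
  · simp

lemma toDigitsCore_eq (f : Nat) : ∀ (n : Nat) (l : List Char), n < f →
    Nat.toDigitsCore 10 f n l = rep n ++ l := by
  induction f with
  | zero => intro n l h; omega
  | succ f ih =>
    intro n l h
    rw [Nat.toDigitsCore, rep]
    by_cases h10 : n < 10
    · have : n / 10 = 0 := Nat.div_eq_of_lt h10
      simp [this, h10, Nat.mod_eq_of_lt h10]
    · have hd : n / 10 ≠ 0 := by omega
      have hlt : n / 10 < f := by
        have := Nat.div_lt_self (by omega : 0 < n) (by omega : 1 < 10)
        omega
      simp only [hd, if_false, dif_neg h10]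
      rw [ih (n / 10) _ hlt, List.append_assoc]
      rfl

lemma toStr_toList_eq (n : Int) (h : 0 ≤ n) : (PySem.Int.toStr n).toList = rep n.toNat := by
  rw [PySem.Int.toList_toStr, PySem.Int.toChars]
  rw [if_neg (by omega), Nat.toDigits, toDigitsCore_eq _ _ _ (Nat.lt_succ_self _)]
  simp

lemma digitChar_eq_eight (k : Nat) (hk : k < 10) : (Nat.digitChar k = '8') ↔ k = 8 := by
  interval_cases k <;> simp [Nat.digitChar]

/-- `singles` of a list. -/
def sg (l : List Char) : Int := (l.map (fun ch => if ch = '8' then (1 : Int) else 0)).sum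

/-- `doubles` of a list: adjacent-pair indicator sum. -/
def db (l : List Char) : Int :=
  ((l.zip (l.drop 1)).map (fun p => if p.1 = '8' ∧ p.2 = '8' then (1 : Int) else 0)).sum

lemma zip_tail_append (xs : List Char) (c a : Char) (h : xs.getLast? = some a) :
    (xs ++ [c]).zip ((xs ++ [c]).drop 1) =
      xs.zip (xs.drop 1) ++ [(a, c)] := by
  induction xs generalizing a with
  | nil => simp at h
  | cons x t ih =>
    cases t with
    | nil => simp_all
    | cons b t' =>
      have hb : (b :: t').getLast? = some a := by
        simpa [List.getLast?_cons_cons] using h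
      have := ih a hb
      simp only [List.cons_append, List.drop_succ_cons, List.drop_zero] at this ⊢
      simp only [List.zip_cons_cons]
      simp [this]

lemma db_append (xs : List Char) (c a : Char) (h : xs.getLast? = some a) :
    db (xs ++ [c]) = db xs + (if a = '8' ∧ c = '8' then 1 else 0) := by
  unfold db
  rw [zip_tail_append xs c a h]
  simp

lemma sg_append (xs : List Char) (c : Char) :
    sg (xs ++ [c]) = sg xs + (if c = '8' then 1 else 0) := by
  unfold sg; simp

/-- Main invariant: A's recursion computes singles + doubles of the digit string. -/
lemma count8_eq_rep (m : Nat) : count8 (m : Int) = sg (rep m) + db (rep m) := by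
  induction m using Nat.strong_induction_on with
  | _ m ih =>
    rw [count8, rep]
    by_cases h10 : m < 10
    · rw [if_pos (by exact_mod_cast h10), dif_pos h10]
      simp only [sg, db, List.map_cons, List.map_nil, List.sum_cons, List.sum_nil,
        List.drop_succ_cons, List.drop_nil, List.zip_nil_right,
        digitChar_eq_eight m h10]
      have hm8 : ((m : Int) = 8) ↔ m = 8 := by omega
      simp only [hm8]
      split_ifs <;> omega
    · rw [if_neg (by exact_mod_cast h10), dif_neg h10]
      have hq : PySem.Int.floordiv (m : Int) 10 = ((m / 10 : Nat) : Int) :=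
        PySem.Int.floordiv_natCast m 10
      have hr : PySem.Int.mod (m : Int) 10 = ((m % 10 : Nat) : Int) :=
        PySem.Int.mod_natCast m 10
      have hl : PySem.Int.mod (((m / 10 : Nat) : Int)) 10
          = ((m / 10 % 10 : Nat) : Int) := PySem.Int.mod_natCast (m / 10) 10
      have hrec := ih (m / 10) (Nat.div_lt_self (by omega) (by omega))
      rw [sg_append, db_append _ _ _ (rep_getLast? (m / 10))]
      have hnum8 : (((m % 10 : Nat) : Int) = 8) ↔ m % 10 = 8 := by omega
      have hleft8 : (((m / 10 % 10 : Nat) : Int) = 8) ↔ m / 10 % 10 = 8 := by omega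
      simp only [hq, hr, hl, hrec, hnum8, hleft8,
        digitChar_eq_eight _ (Nat.mod_lt m (by omega)),
        digitChar_eq_eight _ (Nat.mod_lt (m / 10) (by omega))]
      split_ifs <;> omega

-- ===== VERDICT (by name: the statement is the Claim_ definition above) =====
theorem count8_spec : Claim_equal_count8 := by
  intro n _
  unfold Spec_count8 count8_alt
  by_cases hn : n < 0
  · rw [if_pos hn, count8]
    have h8 : ¬ (n = 8) := by omega
    rw [if_pos (by omega), if_neg h8]
  · rw [if_neg hn]
    have hs := toStr_toList_eq n (by omega)
    have hcast : ((n.toNat : Nat) : Int) = n := Int.toNat_of_nonneg (by omega)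
    have hmain := count8_eq_rep n.toNat
    rw [hcast] at hmain
    rw [hmain, hs]
    have hsl : ∀ l : List Char, PySem.List.slice l (some 1) = l.drop 1 := fun l =>
      PySem.List.slice_from l (by norm_num)
    simp only [hsl, sg, db]
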